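-- pv_equiv track=rewrite | github.com/hemxzp/leetcode | 32. Longest Valid Parentheses.py | check
-- ===== SOURCE A (Python) =====
-- def check(s):
--     s=s[::-1]
--     count=0
--     res=0
--     for i in range(len(s)):
--         if s[i]==')':
--             count+=1
--         else:
--             count-=1
--             if count==0:
--                 res=i+1
--             if count<0:
--                 break
--     return res
-- ===== SOURCE B (Python) =====
-- def check(s):
--     # forward scan with a stack of indices of unmatched opens; the answer is the
--     # length of the suffix after the last unmatched position
--     stack = []
--     last = -1
--     for i, c in enumerate(s):
--         if c == ')':
--             if stack:
--                 stack.pop()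
--             else:
--                 last = i
--         else:
--             stack.append(i)
--     if stack:
--         last = max(last, stack[-1])
--     return len(s) - 1 - last
-- ===== Notes on version B (the rewrite author's own statement) =====
-- stated objective: alternative
-- what changed: Replaces A's reversed-string counter scan (record last zero, break on negative) by a forward scan over the original string that maintains a stack of indices of unmatched opens plus the last unmatched ')' index, returning the suffix length after the last unmatched position.
import Mathlib
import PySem

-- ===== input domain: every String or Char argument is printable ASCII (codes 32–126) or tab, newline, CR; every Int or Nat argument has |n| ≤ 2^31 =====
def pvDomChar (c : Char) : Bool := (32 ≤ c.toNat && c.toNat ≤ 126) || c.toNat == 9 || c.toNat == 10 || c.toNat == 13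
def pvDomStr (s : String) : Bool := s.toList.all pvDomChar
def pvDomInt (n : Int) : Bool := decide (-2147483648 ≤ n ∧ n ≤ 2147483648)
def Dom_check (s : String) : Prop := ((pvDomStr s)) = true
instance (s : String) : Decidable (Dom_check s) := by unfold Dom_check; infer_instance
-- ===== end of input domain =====

-- B replaces A's reversed counter scan by a forward scan with a stack of indices of
-- unmatched characters (same O(n) cost, different data structure and traversal).

-- ===== PORT A =====
-- A's loop over the reversed string: index i, running count, recorded res; breaks when count < 0
def checkA : List Char → Int → Int → Int → Int
  | [], _, _, res => res
  | c :: rest, i, count, res =>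
    if c = ')' then
      checkA rest (i + 1) (count + 1) res
    else
      let count' := count - 1
      let res' := if count' = 0 then i + 1 else res
      if count' < 0 then res' else checkA rest (i + 1) count' res'

def check (s : String) : Int :=
  let rev := (PySem.List.slice? s.toList none none (-1)).getD []   -- s[::-1]
  checkA rev 0 0 0

-- ===== PORT B =====
-- Source B's loop: for i, c in enumerate(s) with a stack of indices and the last unmatched ')' index
def loopB : List Char → Int → List Int → Int → (List Int × Int)
  | [], _, st, last => (st, last)
  | c :: rest, i, st, last =>
    if c = ')' then
      match st with
      | [] => loopB rest (i + 1) [] i          -- unmatched ')': record its index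
      | _ :: st' => loopB rest (i + 1) st' last -- pop the matching open
    else loopB rest (i + 1) (i :: st) last      -- push index of an open

def check_alt (s : String) : Int :=
  let l := s.toList
  let r := loopB l 0 [] (-1)
  let last := match r.1 with
    | [] => r.2
    | t :: _ => max r.2 t                       -- if stack: last = max(last, stack[-1])
  (l.length : Int) - 1 - last

-- ===== PRECONDITION & SPEC =====
def Spec_check (s : String) (out : Int) : Prop := out = check_alt s
instance (s : String) (out : Int) : Decidable (Spec_check s out) := by unfold Spec_check; infer_instance

-- ===== CLAIM (what is proved, stated in full; the proofs are below) =====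
def Claim_equal_check : Prop := ∀ (s : String), Dom_check s → Spec_check s (check s)

-- ===== LEMMAS AND PROOFS =====

-- prefix-sum of the "+1 for an open char, -1 for ')'" valuation
def pvVal (c : Char) : Int := if c = ')' then -1 else 1

def pvS (l : List Char) (k : Nat) : Int := ((l.take k).map pvVal).sum

-- the predicate behind A's result: the first k chars of the reversed string are balanced
def predA (r : List Char) (k : Nat) : Prop := pvS r k = 0 ∧ ∀ k' ≤ k, pvS r k' ≤ 0

@[reducible] def decPredA (r : List Char) : DecidablePred (predA r) := fun _ => by
  unfold predA; infer_instance

def pvG (r : List Char) (i : Nat) : Nat := @Nat.findGreatest (predA r) (decPredA r) i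

-- loop invariant of B's scan after processing the first iN characters of l
def InvB (l : List Char) (iN : Nat) (st : List Int) (last : Int) : Prop :=
  (∀ j ∈ st, ∃ jn : Nat, j = (jn : Int) ∧ jn < iN ∧
      ∀ k : Nat, jn < k → k ≤ iN → pvS l jn < pvS l k) ∧
  (∀ jn : Nat, jn < iN → (∀ k : Nat, jn < k → k ≤ iN → pvS l jn < pvS l k) → ((jn : Int) ∈ st)) ∧
  (∀ r : Nat, (h : r < st.length) → ∃ jn : Nat, st[r] = (jn : Int) ∧ pvS l jn = pvS l iN - (r + 1)) ∧
  ((last = -1 ∧ ∀ jn : Nat, jn < iN → ∃ k ≤ jn, pvS l k ≤ pvS l (jn + 1)) ∨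
   (∃ ln : Nat, last = (ln : Int) ∧ ln < iN ∧ (∀ k ≤ ln, pvS l (ln + 1) < pvS l k) ∧
      ∀ jn : Nat, ln < jn → jn < iN → ∃ k ≤ jn, pvS l k ≤ pvS l (jn + 1)))

theorem pvS_succ (l : List Char) (k : Nat) (h : k < l.length) :
    pvS l (k + 1) = pvS l k + pvVal l[k] := by
  unfold pvS
  have hm : k < (l.map pvVal).length := by simpa using h
  rw [List.map_take, List.take_add_one, List.getElem?_eq_getElem hm]
  simp

theorem pvS_step (l : List Char) (k : Nat) (h : k < l.length) :
    pvS l (k + 1) = pvS l k + 1 ∨ pvS l (k + 1) = pvS l k - 1 := by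
  rw [pvS_succ l k h]
  by_cases hc : l[k] = ')'
  · right; simp [pvVal, hc]; ring
  · left; simp [pvVal, hc]

theorem lastArgmin (f : Nat → Int) (n : Nat) :
    ∃ j ≤ n, (∀ k ≤ n, f j ≤ f k) ∧ ∀ m, j < m → m ≤ n → f j < f m := by
  induction n with
  | zero =>
    refine ⟨0, le_rfl, fun k hk => ?_, fun m hm hm' => by omega⟩
    have : k = 0 := by omega
    simp [this]
  | succ n ih =>
    obtain ⟨j, hj, hmin, hstrict⟩ := ih
    by_cases hle : f (n + 1) ≤ f j
    · refine ⟨n + 1, le_rfl, fun k hk => ?_, fun m hm hm' => by omega⟩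
      rcases Nat.lt_or_ge k (n + 1) with h | h
      · exact le_trans hle (hmin k (by omega))
      · have : k = n + 1 := by omega
        simp [this]
    · refine ⟨j, by omega, fun k hk => ?_, fun m hm hm' => ?_⟩
      · rcases Nat.lt_or_ge k (n + 1) with h | h
        · exact hmin k (by omega)
        · have : k = n + 1 := by omega
          rw [this]; omega
      · rcases Nat.lt_or_ge m (n + 1) with h | h
        · exact hstrict m hm (by omega)
        · have : m = n + 1 := by omega
          rw [this]; omega

theorem no_record_min (f : Nat → Int) (n : Nat)
    (h : ∀ j, j < n → ¬ (∀ k, j < k → k ≤ n → f j < f k)) : ∀ k ≤ n, f n ≤ f k := by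
  obtain ⟨j, hj, hmin, hstrict⟩ := lastArgmin f n
  rcases Nat.lt_or_ge j n with hlt | hge
  · exact absurd (fun k hk hk' => hstrict k hk hk') (h j hlt)
  · have : j = n := by omega
    subst this; exact hmin

theorem down_closed (f : Nat → Int) (b n : Nat)
    (hlow : ∀ k, k < b → f b ≤ f k)
    (H : ∀ j, b ≤ j → j < n → ∃ k ≤ j, f k ≤ f (j + 1)) :
    ∀ m, b ≤ m → m ≤ n → f b ≤ f m := by
  intro m
  induction m using Nat.strong_induction_on with
  | _ m ih =>
    intro hbm hmn
    rcases Nat.eq_or_lt_of_le hbm with rfl | hlt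
    · rfl
    · obtain ⟨m', rfl⟩ : ∃ m', m = m' + 1 := ⟨m - 1, by omega⟩
      obtain ⟨k, hk, hfk⟩ := H m' (by omega) (by omega)
      rcases Nat.lt_or_ge k b with h | h
      · exact le_trans (hlow k h) hfk
      · exact le_trans (ih k (by omega) h (by omega)) hfk

theorem findGreatest_stable (p : Nat → Prop) [DecidablePred p] (b a : Nat) (hab : a ≤ b)
    (h : ∀ k, a < k → k ≤ b → ¬ p k) : Nat.findGreatest p b = Nat.findGreatest p a := by
  induction b with
  | zero =>
    have : a = 0 := by omega
    rw [this]
  | succ b ih =>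
    rcases Nat.eq_or_lt_of_le hab with rfl | hlt
    · rfl
    · rw [Nat.findGreatest_succ, if_neg (h (b + 1) (by omega) le_rfl)]
      exact ih (by omega) (fun k hk hk' => h k hk (by omega))

theorem pvS_reverse (l : List Char) (k : Nat) (_h : k ≤ l.length) :
    pvS l.reverse k = pvS l l.length - pvS l (l.length - k) := by
  unfold pvS
  rw [List.take_reverse, List.map_reverse, List.sum_reverse, List.take_length]
  have hsplit : ((l.take (l.length - k)).map pvVal).sum + ((l.drop (l.length - k)).map pvVal).sum
      = (l.map pvVal).sum := by
    rw [← List.sum_append, ← List.map_append, List.take_append_drop]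
  linarith

-- A's loop computes pvG of the whole (reversed) list
theorem A_loop (r : List Char) : ∀ (rest : List Char) (iN : Nat),
    r.drop iN = rest → iN + rest.length = r.length → (∀ k ≤ iN, pvS r k ≤ 0) →
    checkA rest (iN : Int) (-(pvS r iN)) ((pvG r iN : Nat) : Int) = ((pvG r r.length : Nat) : Int) := by
  intro rest
  induction rest with
  | nil =>
    intro iN _ hlen _
    have : iN = r.length := by simpa using hlen
    subst this
    rfl
  | cons c rest' ih =>
    intro iN hdrop hlen hnn
    have hiN : iN < r.length := by simp at hlen; omega
    have hget : r.drop iN = r[iN] :: r.drop (iN + 1) := List.drop_eq_getElem_cons hiN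
    rw [hdrop] at hget
    have hc : c = r[iN] := (List.cons.injEq _ _ _ _ ▸ hget).1
    have hrest : rest' = r.drop (iN + 1) := (List.cons.injEq _ _ _ _ ▸ hget).2
    have hsucc : pvS r (iN + 1) = pvS r iN + pvVal r[iN] := pvS_succ r iN hiN
    have hcast : ((iN : Int) + 1) = ((iN + 1 : Nat) : Int) := by push_cast; ring
    by_cases hcp : c = ')'
    · have hval : pvVal r[iN] = -1 := by rw [← hc, hcp]; rfl
      have hS1 : pvS r (iN + 1) = pvS r iN - 1 := by rw [hsucc, hval]; ring
      have hSneg : pvS r (iN + 1) < 0 := by have := hnn iN le_rfl; omega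
      have hG : pvG r (iN + 1) = pvG r iN := by
        unfold pvG
        exact @Nat.findGreatest_of_not _ (decPredA r) _ (fun hp => absurd hp.1 (by omega))
      have hstep : checkA (c :: rest') (iN : Int) (-(pvS r iN)) ((pvG r iN : Nat) : Int)
          = checkA rest' ((iN : Int) + 1) (-(pvS r iN) + 1) ((pvG r iN : Nat) : Int) := by
        simp [checkA, hcp]
      rw [hstep, hcast, ← hG]
      have hcount : -(pvS r iN) + 1 = -(pvS r (iN + 1)) := by omega
      rw [hcount]
      refine ih (iN + 1) hrest.symm (by simp at hlen ⊢; omega) (fun k hk => ?_)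
      rcases Nat.lt_or_ge k (iN + 1) with h | h
      · exact hnn k (by omega)
      · have : k = iN + 1 := by omega
        rw [this]; omega
    · have hval : pvVal r[iN] = 1 := by rw [← hc]; simp [pvVal, hcp]
      have hS1 : pvS r (iN + 1) = pvS r iN + 1 := by rw [hsucc, hval]
      have hstep : checkA (c :: rest') (iN : Int) (-(pvS r iN)) ((pvG r iN : Nat) : Int)
          = (if -(pvS r iN) - 1 < 0
             then (if -(pvS r iN) - 1 = 0 then (iN : Int) + 1 else ((pvG r iN : Nat) : Int))
             else checkA rest' ((iN : Int) + 1) (-(pvS r iN) - 1)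
               (if -(pvS r iN) - 1 = 0 then (iN : Int) + 1 else ((pvG r iN : Nat) : Int))) := by
        simp [checkA, hcp]
      rw [hstep]
      have hcount : -(pvS r iN) - 1 = -(pvS r (iN + 1)) := by omega
      rcases lt_trichotomy (pvS r (iN + 1)) 0 with hs | hs | hs
      · have h1 : ¬ (-(pvS r iN) - 1 = 0) := by omega
        have h2 : ¬ (-(pvS r iN) - 1 < 0) := by omega
        rw [if_neg h2, if_neg h1]
        have hG : pvG r (iN + 1) = pvG r iN := by
          unfold pvG
          exact @Nat.findGreatest_of_not _ (decPredA r) _ (fun hp => absurd hp.1 (by omega))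
        rw [hcast, hcount, ← hG]
        refine ih (iN + 1) hrest.symm (by simp at hlen ⊢; omega) (fun k hk => ?_)
        rcases Nat.lt_or_ge k (iN + 1) with h | h
        · exact hnn k (by omega)
        · have : k = iN + 1 := by omega
          rw [this]; omega
      · have h1 : -(pvS r iN) - 1 = 0 := by omega
        have h2 : ¬ (-(pvS r iN) - 1 < 0) := by omega
        rw [if_neg h2, if_pos h1]
        have hp : predA r (iN + 1) := by
          refine ⟨hs, fun k' hk' => ?_⟩
          rcases Nat.lt_or_ge k' (iN + 1) with h | h
          · exact hnn k' (by omega)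
          · have : k' = iN + 1 := by omega
            rw [this]; omega
        have hG : pvG r (iN + 1) = iN + 1 := by
          unfold pvG; exact @Nat.findGreatest_eq _ (decPredA r) _ hp
        rw [hcast, hcount]
        have hIH := ih (iN + 1) hrest.symm (by simp at hlen ⊢; omega) (by
          intro k hk
          rcases Nat.lt_or_ge k (iN + 1) with h | h
          · exact hnn k (by omega)
          · have : k = iN + 1 := by omega
            rw [this]; omega)
        rw [hG] at hIH
        exact hIH
      · have h1 : ¬ (-(pvS r iN) - 1 = 0) := by omega
        have h2 : -(pvS r iN) - 1 < 0 := by omega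
        rw [if_pos h2, if_neg h1]
        have hG : @Nat.findGreatest (predA r) (decPredA r) r.length = @Nat.findGreatest (predA r) (decPredA r) iN := by
          refine @findGreatest_stable _ (decPredA r) r.length iN (by omega) (fun k hk hk' hp => ?_)
          have := hp.2 (iN + 1) (by omega)
          omega
        unfold pvG
        rw [hG]

-- B's loop maintains InvB
theorem B_loop (l : List Char) : ∀ (rest : List Char) (iN : Nat) (st : List Int) (last : Int),
    l.drop iN = rest → iN + rest.length = l.length → InvB l iN st last →
    InvB l l.length (loopB rest (iN : Int) st last).1 (loopB rest (iN : Int) st last).2 := by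
  intro rest
  induction rest with
  | nil =>
    intro iN st last _ hlen hinv
    have : iN = l.length := by simpa using hlen
    subst this
    exact hinv
  | cons c rest' ih =>
    intro iN st last hdrop hlen hinv
    have hiN : iN < l.length := by simp at hlen; omega
    have hget : l.drop iN = l[iN] :: l.drop (iN + 1) := List.drop_eq_getElem_cons hiN
    rw [hdrop] at hget
    have hc : c = l[iN] := (List.cons.injEq _ _ _ _ ▸ hget).1
    have hrest : rest' = l.drop (iN + 1) := (List.cons.injEq _ _ _ _ ▸ hget).2
    have hsucc : pvS l (iN + 1) = pvS l iN + pvVal l[iN] := pvS_succ l iN hiN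
    have hcast : ((iN : Int) + 1) = ((iN + 1 : Nat) : Int) := by push_cast; ring
    have hlen' : iN + 1 + rest'.length = l.length := by simp at hlen ⊢; omega
    obtain ⟨A1, A2, A3, A4⟩ := hinv
    by_cases hcp : c = ')'
    · have hval : pvVal l[iN] = -1 := by rw [← hc, hcp]; rfl
      have hS1 : pvS l (iN + 1) = pvS l iN - 1 := by rw [hsucc, hval]; ring
      cases st with
      | nil =>
        -- unmatched ')': record its index
        have hstep : loopB (c :: rest') (iN : Int) [] last
            = loopB rest' ((iN : Int) + 1) [] (iN : Int) := by
          simp [loopB, hcp]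
        rw [hstep, hcast]
        have hmin : ∀ k ≤ iN, pvS l iN ≤ pvS l k := by
          refine no_record_min (fun k => pvS l k) iN (fun j hj hrec => ?_)
          exact absurd (A2 j hj hrec) (List.not_mem_nil)
        refine ih (iN + 1) [] (iN : Int) hrest.symm hlen' ?_
        refine ⟨by simp, ?_, by simp, ?_⟩
        · intro jn hjn hrec
          exfalso
          rcases Nat.lt_or_ge jn iN with h | h
          · exact absurd (A2 jn h (fun k hk hk' => hrec k hk (by omega))) (List.not_mem_nil)
          · have heq : jn = iN := by omega
            have h2 := hrec (iN + 1) (by omega) le_rfl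
            rw [heq, hS1] at h2
            omega
        · right
          refine ⟨iN, rfl, by omega, fun k hk => ?_, fun jn h1 h2 => by omega⟩
          have := hmin k hk
          omega
      | cons t st' =>
        -- pop the matching open
        have hstep : loopB (c :: rest') (iN : Int) (t :: st') last
            = loopB rest' ((iN : Int) + 1) st' last := by
          simp [loopB, hcp]
        rw [hstep, hcast]
        obtain ⟨tn, htn, htS⟩ := A3 0 (by simp)
        simp only [List.getElem_cons_zero] at htn htS
        have htlt : tn < iN := by
          obtain ⟨tn2, htn2, hlt2, _⟩ := A1 t List.mem_cons_self
          have : tn2 = tn := by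
            rw [htn] at htn2
            exact_mod_cast htn2.symm
          omega
        refine ih (iN + 1) st' last hrest.symm hlen' ?_
        refine ⟨?_, ?_, ?_, ?_⟩
        · -- A1 for st'
          intro j hj
          obtain ⟨jn, hjeq, hjlt, hjrec⟩ := A1 j (List.mem_cons_of_mem t hj)
          refine ⟨jn, hjeq, by omega, fun k hk hk' => ?_⟩
          rcases Nat.lt_or_ge k (iN + 1) with h | h
          · exact hjrec k hk (by omega)
          · have hkk : k = iN + 1 := by omega
            obtain ⟨r, hr, hre⟩ := List.getElem_of_mem hj
            obtain ⟨jn2, hjeq2, hjS2⟩ := A3 (r + 1) (by simpa using hr)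
            rw [List.getElem_cons_succ, hre, hjeq] at hjeq2
            have : jn = jn2 := by exact_mod_cast hjeq2
            subst this
            rw [hkk, hS1]
            omega
        · -- A2 for st'
          intro jn hjn hrec
          have hne : jn ≠ iN := by
            intro hh
            have h2 := hrec (iN + 1) (by omega) le_rfl
            rw [hh, hS1] at h2
            omega
          have hjn' : jn < iN := by omega
          have hmem := A2 jn hjn' (fun k hk hk' => hrec k hk (by omega))
          rcases List.mem_cons.mp hmem with h0 | h1
          · exfalso
            have hje : jn = tn := by
              have : (jn : Int) = (tn : Int) := by rw [h0, htn]
              exact_mod_cast this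
            have h2 := hrec (iN + 1) (by omega) le_rfl
            rw [hje, hS1] at h2
            omega
          · exact h1
        · -- A3 for st'
          intro r hr
          obtain ⟨jn, hjeq, hjS⟩ := A3 (r + 1) (by simpa using hr)
          rw [List.getElem_cons_succ] at hjeq
          exact ⟨jn, hjeq, by rw [hS1]; omega⟩
        · -- A4 preserved / extended
          rcases A4 with ⟨hl, hcl⟩ | ⟨ln, hleq, hllt, hlclose, hlgr⟩
          · left
            refine ⟨hl, fun jn hjn => ?_⟩
            rcases Nat.lt_or_ge jn iN with h | h
            · exact hcl jn h
            · have heq : jn = iN := by omega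
              rw [heq]
              exact ⟨tn, by omega, by omega⟩
          · right
            refine ⟨ln, hleq, by omega, hlclose, fun jn h1 h2 => ?_⟩
            rcases Nat.lt_or_ge jn iN with h | h
            · exact hlgr jn h1 h
            · have heq : jn = iN := by omega
              rw [heq]
              exact ⟨tn, by omega, by omega⟩
    · -- push index of an open
      have hval : pvVal l[iN] = 1 := by rw [← hc]; simp [pvVal, hcp]
      have hS1 : pvS l (iN + 1) = pvS l iN + 1 := by rw [hsucc, hval]
      have hstep : loopB (c :: rest') (iN : Int) st last
          = loopB rest' ((iN : Int) + 1) ((iN : Int) :: st) last := by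
        simp [loopB, hcp]
      rw [hstep, hcast]
      refine ih (iN + 1) ((iN : Int) :: st) last hrest.symm hlen' ?_
      refine ⟨?_, ?_, ?_, ?_⟩
      · intro j hj
        rcases List.mem_cons.mp hj with hj0 | hjm
        · refine ⟨iN, hj0, by omega, fun k hk hk' => ?_⟩
          have : k = iN + 1 := by omega
          subst this
          omega
        · obtain ⟨jn, hjeq, hjlt, hjrec⟩ := A1 j hjm
          refine ⟨jn, hjeq, by omega, fun k hk hk' => ?_⟩
          rcases Nat.lt_or_ge k (iN + 1) with h | h
          · exact hjrec k hk (by omega)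
          · have hkk : k = iN + 1 := by omega
            have := hjrec iN hjlt le_rfl
            rw [hkk]
            omega
      · intro jn hjn hrec
        rcases Nat.lt_or_ge jn iN with h | h
        · exact List.mem_cons_of_mem _ (A2 jn h (fun k hk hk' => hrec k hk (by omega)))
        · have heq : jn = iN := by omega
          rw [heq]
          exact List.mem_cons_self
      · intro r hr
        cases r with
        | zero => exact ⟨iN, by simp, by rw [hS1]; omega⟩
        | succ r' =>
          obtain ⟨jn, hjeq, hjS⟩ := A3 r' (by simpa using hr)
          rw [List.getElem_cons_succ]
          exact ⟨jn, hjeq, by rw [hS1]; omega⟩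
      · rcases A4 with ⟨hl, hcl⟩ | ⟨ln, hleq, hllt, hlclose, hlgr⟩
        · left
          refine ⟨hl, fun jn hjn => ?_⟩
          rcases Nat.lt_or_ge jn iN with h | h
          · exact hcl jn h
          · have heq : jn = iN := by omega
            rw [heq]
            exact ⟨iN, le_rfl, by omega⟩
        · right
          refine ⟨ln, hleq, by omega, hlclose, fun jn h1 h2 => ?_⟩
          rcases Nat.lt_or_ge jn iN with h | h
          · exact hlgr jn h1 h
          · have heq : jn = iN := by omega
            rw [heq]
            exact ⟨iN, le_rfl, by omega⟩

-- the bridge: from the final invariant, A's closed form equals B's closed form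
-- the final value of `last` in check_alt (Source B's  if stack: last = max(last, stack[-1]))
def pvFinalLast (st : List Int) (last : Int) : Int :=
  match st with
  | [] => last
  | t :: _ => max last t

theorem bridge (l : List Char) (st : List Int) (last : Int)
    (h : InvB l l.length st last) :
    ((pvG l.reverse l.reverse.length : Nat) : Int)
      = (l.length : Int) - 1 - pvFinalLast st last := by
  unfold pvFinalLast
  obtain ⟨A1, A2, A3, A4⟩ := h
  have hpred : ∀ k, k ≤ l.length →
      (predA l.reverse k ↔ (pvS l (l.length - k) = pvS l l.length ∧
        ∀ k' ≤ k, pvS l l.length ≤ pvS l (l.length - k'))) := by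
    intro k hk
    unfold predA
    rw [pvS_reverse l k hk]
    constructor
    · rintro ⟨h1, h2⟩
      refine ⟨by omega, fun k' hk' => ?_⟩
      have := h2 k' hk'
      rw [pvS_reverse l k' (by omega)] at this
      omega
    · rintro ⟨h1, h2⟩
      refine ⟨by omega, fun k' hk' => ?_⟩
      rw [pvS_reverse l k' (by omega)]
      have := h2 k' hk'
      omega
  rw [List.length_reverse]
  cases st with
  | cons t st2 =>
    show ((pvG l.reverse l.length : Nat) : Int) = (l.length : Int) - 1 - max last t
    obtain ⟨tn0, htn, htS⟩ := A3 0 (by simp)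
    simp only [List.getElem_cons_zero] at htn htS
    obtain ⟨tn, htn2, htlt, hrec0⟩ := A1 t List.mem_cons_self
    have htneq : tn0 = tn := by
      rw [htn] at htn2
      exact_mod_cast htn2
    rw [htneq] at htS htn
    have hSt1 : pvS l (tn + 1) = pvS l l.length := by
      rcases pvS_step l tn htlt with hs | hs
      · have := hrec0 (tn + 1) (by omega) (by omega)
        omega
      · have := hrec0 (tn + 1) (by omega) (by omega)
        omega
    have hmax : max last t = (tn : Int) := by
      rcases A4 with ⟨hleq, _⟩ | ⟨ln, hleq, hllt, hclose, _⟩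
      · rw [hleq, htn]
        exact max_eq_right (by have := Int.natCast_nonneg tn; omega)
      · have hlt : ln < tn := by
          by_contra hge
          have h1 := hrec0 (ln + 1) (by omega) (by omega)
          have h2 := hclose tn (by omega)
          omega
        rw [hleq, htn]
        exact max_eq_right (by exact_mod_cast Nat.le_of_lt hlt)
    rw [hmax]
    have hfg : @Nat.findGreatest (predA l.reverse) (decPredA l.reverse) l.length
        = l.length - 1 - tn := by
      letI := decPredA l.reverse
      refine Nat.findGreatest_eq_iff.mpr ⟨by omega, fun _ => ?_, fun j hj hj' => ?_⟩
      · rw [hpred _ (by omega)]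
        have hnm : l.length - (l.length - 1 - tn) = tn + 1 := by omega
        rw [hnm]
        refine ⟨hSt1, fun k' hk' => ?_⟩
        rcases Nat.eq_or_lt_of_le (by omega : tn + 1 ≤ l.length - k') with heq | hlt2
        · rw [← heq]
          omega
        · have := hrec0 (l.length - k') (by omega) (by omega)
          omega
      · rw [hpred _ hj']
        rintro ⟨_, h2⟩
        have hw := h2 (l.length - tn) (by omega)
        have : l.length - (l.length - tn) = tn := by omega
        rw [this] at hw
        omega
    unfold pvG
    rw [hfg]
    omega
  | nil =>
    show ((pvG l.reverse l.length : Nat) : Int) = (l.length : Int) - 1 - last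
    have hmin : ∀ k ≤ l.length, pvS l l.length ≤ pvS l k := by
      refine no_record_min (fun k => pvS l k) l.length (fun j hj hrec => ?_)
      exact absurd (A2 j hj hrec) (List.not_mem_nil)
    rcases A4 with ⟨hleq, hcl⟩ | ⟨ln, hleq, hllt, hclose, hgr⟩
    · -- no unmatched close and empty stack: the whole string is balanced
      have hdc : ∀ m, 0 ≤ m → m ≤ l.length → pvS l 0 ≤ pvS l m :=
        down_closed (pvS l) 0 l.length (fun k hk => by omega) (fun j hj hj' => hcl j hj')
      have h0 : pvS l 0 = 0 := by simp [pvS]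
      have hn : pvS l l.length = 0 := by
        have h1 := hmin 0 (by omega)
        have h2 := hdc l.length (by omega) le_rfl
        omega
      have hfg : @Nat.findGreatest (predA l.reverse) (decPredA l.reverse) l.length
          = l.length := by
        refine @Nat.findGreatest_eq _ (decPredA l.reverse) _ ?_
        rw [hpred _ le_rfl]
        refine ⟨by simp [h0, hn], fun k' hk' => ?_⟩
        have := hdc (l.length - k') (by omega) (by omega)
        omega
      unfold pvG
      rw [hfg, hleq]
      omega
    · have hdc : ∀ m, ln + 1 ≤ m → m ≤ l.length → pvS l (ln + 1) ≤ pvS l m :=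
        down_closed (pvS l) (ln + 1) l.length
          (fun k hk => le_of_lt (hclose k (by omega)))
          (fun j hj hj' => hgr j (by omega) hj')
      have hn : pvS l l.length = pvS l (ln + 1) := by
        have h1 := hmin (ln + 1) (by omega)
        have h2 := hdc l.length (by omega) le_rfl
        omega
      have hfg : @Nat.findGreatest (predA l.reverse) (decPredA l.reverse) l.length
          = l.length - 1 - ln := by
        letI := decPredA l.reverse
        refine Nat.findGreatest_eq_iff.mpr ⟨by omega, fun _ => ?_, fun j hj hj' => ?_⟩
        · rw [hpred _ (by omega)]
          have hnm : l.length - (l.length - 1 - ln) = ln + 1 := by omega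
          rw [hnm]
          refine ⟨by omega, fun k' hk' => ?_⟩
          have := hdc (l.length - k') (by omega) (by omega)
          omega
        · rw [hpred _ hj']
          rintro ⟨h1, _⟩
          have hw := hclose (l.length - j) (by omega)
          omega
      unfold pvG
      rw [hfg, hleq]
      omega

-- ===== VERDICT (by name: the statement is the Claim_ definition above) =====
theorem check_spec : Claim_equal_check := by
  intro s _
  unfold Spec_check check check_alt
  rw [PySem.List.slice?_none_none_neg_one]
  simp only [Option.getD_some]
  have h0 : pvS s.toList.reverse 0 = 0 := by simp [pvS]
  have hA := A_loop s.toList.reverse s.toList.reverse 0 rfl (by simp) (by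
    intro k hk
    have : k = 0 := by omega
    rw [this, h0])
  rw [h0] at hA
  simp only [Nat.cast_zero, neg_zero, show pvG s.toList.reverse 0 = 0 from rfl] at hA
  have hInv0 : InvB s.toList 0 [] (-1) :=
    ⟨by simp, fun jn h => absurd h (Nat.not_lt_zero jn), by simp,
      Or.inl ⟨rfl, fun jn h => absurd h (Nat.not_lt_zero jn)⟩⟩
  have hB := B_loop s.toList s.toList 0 [] (-1) rfl (by simp) hInv0
  simp only [Nat.cast_zero] at hB
  have hbr := bridge s.toList _ _ hB
  exact hA.trans hbr
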